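-- pv_equiv track=rewrite | github.com/pypi-data/pypi-mirror-381 | packages/pytest-bashdoctest/pytest_bashdoctest-2025.10.3.tar.gz/pytest_bashdoctest-2025.10.3/src/pytest_bashdoctest/matcher.py | match_line
-- ===== SOURCE A (Python) =====
-- def normalize_line(line: str) -> str:
--     """Strip trailing whitespace only.
--
--     We use minimal normalization because jq -S produces deterministic output.
--     Trailing whitespace is invisible and irrelevant, but leading whitespace
--     shows JSON nesting structure and must be preserved.
--     """
--     return line.rstrip()
--
-- def match_line(expected: str, actual: str) -> bool:
--     """Match single line with string-level ELLIPSIS support.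
--
--     Examples:
--         expected: "url": "https://.../files/....pdf"
--         actual:   "url": "https://example.com/files/doc-123.pdf"
--         -> True
--
--         expected: "username": "johndoe"
--         actual:   "username": "johndoe"
--         -> True
--
--     Algorithm:
--     1. Normalize both lines (rstrip)
--     2. If no '...' in expected, must be exact match
--     3. Split expected by '...' to get segments
--     4. Check each segment appears in actual in order
--     """
--     expected = normalize_line(expected)
--     actual = normalize_line(actual)
--
--     if "..." not in expected:
--         return expected == actual
--
--     # Split expected by '...'
--     parts = expected.split("...")
--     pos = 0
--     for part in parts:
--         idx = actual.find(part, pos)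
--         if idx == -1:
--             return False
--         pos = idx + len(part)
--     return True
-- ===== SOURCE B (Python) =====
-- def match_line(expected: str, actual: str) -> bool:
--     e = expected.rstrip()
--     a = actual.rstrip()
--     if "..." in e:
--         return _ok(e.split("..."), a)
--     return e == a
--
-- def _ok(parts, s):
--     # backtracking recursion: try every placement of the first segment,
--     # then recurse on the remaining segments and the remaining string
--     if not parts:
--         return True
--     p = parts[0]
--     return any(s.startswith(p, i) and _ok(parts[1:], s[i + len(p):])
--                for i in range(len(s) + 1))
-- ===== Notes on version B (the rewrite author's own statement) =====
-- stated objective: alternative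
-- what changed: B decides the ordered-segment question by backtracking recursion over the segment list (try every start position of the first segment with startswith, recurse on the rest) instead of A's single greedy find-loop with a running position; both decide the same ordered-placement existence question.
import Mathlib
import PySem

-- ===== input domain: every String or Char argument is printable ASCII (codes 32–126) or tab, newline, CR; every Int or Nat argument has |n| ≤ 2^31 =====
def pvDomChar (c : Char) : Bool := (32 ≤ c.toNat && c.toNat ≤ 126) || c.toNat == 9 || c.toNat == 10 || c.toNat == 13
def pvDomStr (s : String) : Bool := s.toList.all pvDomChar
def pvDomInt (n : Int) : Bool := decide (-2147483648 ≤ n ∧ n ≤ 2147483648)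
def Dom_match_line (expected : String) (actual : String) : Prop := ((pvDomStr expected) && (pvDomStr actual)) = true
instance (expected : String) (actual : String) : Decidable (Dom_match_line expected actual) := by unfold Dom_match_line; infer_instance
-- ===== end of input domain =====

-- B replaces A's greedy earliest-occurrence find-loop by a backtracking recursion
-- over the segment list (try every placement of the first segment, recurse);
-- a genuinely different algorithm for the same ordered-placement question.

-- ===== PORT A =====
-- normalize_line: strip trailing whitespace only (line.rstrip())
def normalize_line (line : List Char) : List Char := PySem.Chars.rstrip line

-- the 'for part in parts' loop of A: pos accumulator, actual.find(part, pos)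
def matchLoopA (a : List Char) : List (List Char) → Int → Bool
  | [], _ => true
  | p :: ps, pos =>
      let idx := PySem.Chars.findFrom a p pos none
      if idx == -1 then false else matchLoopA a ps (idx + (p.length : Int))

def match_line (expected : String) (actual : String) : Bool :=
  let e := normalize_line expected.toList
  let a := normalize_line actual.toList
  if PySem.Chars.isIn "...".toList e = false then e == a
  else matchLoopA a (PySem.Chars.splitOn e "...".toList) 0

-- ===== PORT B =====
-- _ok: backtracking recursion; s.startswith(p, i) for 0 ≤ i ≤ len(s) is
-- 'p is a prefix of s[i:]', s[i+len(p):] is drop (exact on that range)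
def okB : List (List Char) → List Char → Bool
  | [], _ => true
  | p :: ps, s =>
      (List.range (s.length + 1)).any fun i =>
        p.isPrefixOf (s.drop i) && okB ps (s.drop (i + p.length))

def match_line_alt (expected : String) (actual : String) : Bool :=
  let e := PySem.Chars.rstrip expected.toList
  let a := PySem.Chars.rstrip actual.toList
  if PySem.Chars.isIn "...".toList e then okB (PySem.Chars.splitOn e "...".toList) a
  else e == a

-- ===== PRECONDITION & SPEC =====
def Spec_match_line (expected : String) (actual : String) (out : Bool) : Prop := out = match_line_alt expected actual
instance (expected : String) (actual : String) (out : Bool) : Decidable (Spec_match_line expected actual out) := by unfold Spec_match_line; infer_instance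

-- ===== CLAIM =====
def Claim_equal_match_line : Prop := ∀ (expected : String) (actual : String), Dom_match_line expected actual → Spec_match_line expected actual (match_line expected actual)

-- ===== LEMMAS AND PROOFS =====

-- canonical left-to-right greedy (find + drop form), used only in the proofs
def pvGreedy : List (List Char) → List Char → Bool
  | [], _ => true
  | p :: ps, s =>
      let i := PySem.Chars.find s p
      if i = -1 then false else pvGreedy ps (s.drop (i.toNat + p.length))

-- the placement predicate: the parts occur in order, disjointly
inductive PvSplits : List (List Char) → List Char → Prop
  | nil (s : List Char) : PvSplits [] s
  | cons (p : List Char) (ps : List (List Char)) (u v : List Char) :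
      PvSplits ps v → PvSplits (p :: ps) (u ++ p ++ v)

theorem pvSplits_cons_iff (p : List Char) (ps : List (List Char)) (s : List Char) :
    PvSplits (p :: ps) s ↔ ∃ u v, s = u ++ p ++ v ∧ PvSplits ps v := by
  constructor
  · intro h; cases h with
    | cons p ps u v hv => exact ⟨u, v, rfl, hv⟩
  · rintro ⟨u, v, rfl, hv⟩; exact PvSplits.cons p ps u v hv

-- monotone: a placement in v is a placement in w ++ v
theorem pvSplits_prepend (ps : List (List Char)) (w v : List Char)
    (h : PvSplits ps v) : PvSplits ps (w ++ v) := by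
  cases h with
  | nil => exact PvSplits.nil _
  | cons p ps u v' hv' =>
      have : w ++ (u ++ p ++ v') = (w ++ u) ++ p ++ v' := by simp
      rw [this]; exact PvSplits.cons p ps (w ++ u) v' hv'

-- greedy correctness: the earliest-occurrence scan succeeds iff a placement exists
theorem pvGreedy_iff (ps : List (List Char)) (s : List Char) :
    pvGreedy ps s = true ↔ PvSplits ps s := by
  induction ps generalizing s with
  | nil => simp [pvGreedy]; exact PvSplits.nil s
  | cons p ps ih =>
      constructor
      · intro h
        simp only [pvGreedy] at h
        split_ifs at h with hi
        have hne : PySem.Chars.find s p ≠ -1 := hi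
        have hnn : 0 ≤ PySem.Chars.find s p := by
          have := PySem.Chars.neg_one_le_find s p; omega
        obtain ⟨hpre, -⟩ := PySem.Chars.find_spec hnn
        obtain ⟨w, hw⟩ := hpre
        have hs : s = s.take (PySem.Chars.find s p).toNat ++ p ++ w := by
          calc s = s.take (PySem.Chars.find s p).toNat ++ s.drop (PySem.Chars.find s p).toNat := by
                  simp
            _ = s.take (PySem.Chars.find s p).toNat ++ p ++ w := by rw [← hw]; simp
        have hwv : w = s.drop ((PySem.Chars.find s p).toNat + p.length) := by
          have : s.drop ((PySem.Chars.find s p).toNat + p.length)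
              = (s.drop (PySem.Chars.find s p).toNat).drop p.length := by
            rw [List.drop_drop]
          rw [this, ← hw]; simp
        rw [pvSplits_cons_iff]
        exact ⟨_, _, hs, by rw [hwv]; exact (ih _).mp h⟩
      · intro h
        rw [pvSplits_cons_iff] at h
        obtain ⟨u, v, rfl, hv⟩ := h
        have hpre : p <+: (u ++ p ++ v).drop u.length := by
          have : (u ++ p ++ v).drop u.length = p ++ v := by simp
          rw [this]; exact ⟨v, rfl⟩
        have hinf : p <:+: (u ++ p ++ v) := by
          rw [← PySem.Chars.isIn_iff_infix, ← PySem.Chars.exists_prefix_drop_iff_isIn]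
          exact ⟨u.length, hpre⟩
        have hne : PySem.Chars.find (u ++ p ++ v) p ≠ -1 :=
          (PySem.Chars.find_ne_neg_one_iff _ _).mpr hinf
        have hnn : 0 ≤ PySem.Chars.find (u ++ p ++ v) p := by
          have := PySem.Chars.neg_one_le_find (u ++ p ++ v) p; omega
        obtain ⟨-, hmin⟩ := PySem.Chars.find_spec hnn
        have hle : (PySem.Chars.find (u ++ p ++ v) p).toNat ≤ u.length := by
          by_contra hgt
          exact (hmin u.length (by omega)) hpre
        simp only [pvGreedy]
        rw [if_neg hne]
        apply (ih _).mpr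
        set i := (PySem.Chars.find (u ++ p ++ v) p).toNat with hidef
        have hlen : i + p.length ≤ (u ++ p).length := by simp; omega
        have hdrop : (u ++ p ++ v).drop (i + p.length) = (u ++ p).drop (i + p.length) ++ v := by
          rw [List.append_assoc u p v]
          rw [← List.append_assoc u p v]
          exact List.drop_append_of_le_length hlen
        rw [hdrop]
        exact pvSplits_prepend ps _ v hv

-- A's loop at position k computes the canonical greedy on the suffix
theorem matchLoopA_eq (a : List Char) (ps : List (List Char)) (k : ℕ) (hk : k ≤ a.length) :
    matchLoopA a ps (k : Int) = pvGreedy ps (a.drop k) := by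
  induction ps generalizing k with
  | nil => simp [matchLoopA, pvGreedy]
  | cons p ps ih =>
      simp only [matchLoopA, pvGreedy]
      rw [PySem.Chars.findFrom_natCast a p k hk]
      by_cases hf : PySem.Chars.find (a.drop k) p = -1
      · simp [hf]
      · have hnn : 0 ≤ PySem.Chars.find (a.drop k) p := by
          have := PySem.Chars.neg_one_le_find (a.drop k) p; omega
        set i := PySem.Chars.find (a.drop k) p with hidef
        have hki : ((k : Int) + i ≠ -1) := by omega
        rw [if_neg hf, if_neg (by simpa using hki), if_neg hf]
        obtain ⟨hpre, -⟩ := PySem.Chars.find_spec hnn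
        have hfl := PySem.Chars.find_le_length (a.drop k) p
        have hlen : i.toNat + p.length ≤ (a.drop k).length := by
          have h1 : p.length ≤ ((a.drop k).drop i.toNat).length := hpre.length_le
          rw [List.length_drop] at h1
          omega
        have hk2 : k + (i.toNat + p.length) ≤ a.length := by
          rw [List.length_drop] at hlen; omega
        have hcast : (k : Int) + i + (p.length : Int)
            = ((k + (i.toNat + p.length) : ℕ) : Int) := by push_cast; omega
        rw [hcast, ih _ hk2, List.drop_drop]

-- B's backtracking recursion succeeds iff a placement exists
theorem okB_iff (ps : List (List Char)) (s : List Char) :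
    okB ps s = true ↔ PvSplits ps s := by
  induction ps generalizing s with
  | nil => simp [okB]; exact PvSplits.nil s
  | cons p ps ih =>
      simp only [okB, List.any_eq_true, List.mem_range, Bool.and_eq_true,
        List.isPrefixOf_iff_prefix]
      constructor
      · rintro ⟨i, hi, ⟨t, ht⟩, hrec⟩
        rw [pvSplits_cons_iff]
        refine ⟨s.take i, s.drop (i + p.length), ?_, (ih _).mp hrec⟩
        have hts : t = s.drop (i + p.length) := by
          have h1 : (s.drop i).drop p.length = s.drop (i + p.length) := List.drop_drop ..
          rw [← ht] at h1
          simp at h1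
          rw [h1]
        calc s = s.take i ++ s.drop i := by simp
          _ = s.take i ++ p ++ s.drop (i + p.length) := by
              rw [← ht, hts]; simp
      · intro h
        rw [pvSplits_cons_iff] at h
        obtain ⟨u, v, rfl, hv⟩ := h
        refine ⟨u.length, by simp, ⟨v, ?_⟩, ?_⟩
        · simp
        · have : (u ++ p ++ v).drop (u.length + p.length) = v := by
            rw [List.drop_append_of_le_length (by simp)]
            simp
          rw [this]; exact (ih _).mpr hv

-- ===== VERDICT (by name: the statement is the Claim_ definition above) =====
theorem match_line_spec : Claim_equal_match_line := by
  intro expected actual _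
  unfold Spec_match_line match_line match_line_alt normalize_line
  simp only
  by_cases hdots : PySem.Chars.isIn "...".toList (PySem.Chars.rstrip expected.toList) = true
  · have hd : PySem.Chars.isIn ['.', '.', '.'] (PySem.Chars.rstrip expected.toList) = true := by
      simpa using hdots
    rw [if_neg (by simp [hd]), if_pos hdots]
    set a := PySem.Chars.rstrip actual.toList
    set parts := PySem.Chars.splitOn (PySem.Chars.rstrip expected.toList) "...".toList
    have hA : matchLoopA a parts 0 = pvGreedy parts a := by
      have := matchLoopA_eq a parts 0 (Nat.zero_le _)
      simpa using this
    rw [hA]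
    cases h1 : pvGreedy parts a <;> cases h2 : okB parts a
    · rfl
    · exact absurd ((pvGreedy_iff ..).mpr ((okB_iff ..).mp h2)) (by simp [h1])
    · exact absurd ((okB_iff ..).mpr ((pvGreedy_iff ..).mp h1)) (by simp [h2])
    · rfl
  · rw [if_pos (by simpa using hdots), if_neg hdots]
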